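-- pv_equiv track=rewrite | github.com/hwennnn/leetcode-solutions | problems/largest_number_after_digit_swaps_by_parity/solution.py | largestInteger
-- ===== SOURCE A (Python) =====
-- def largestInteger(num: int) -> int:
--     s = list(str(num))
--     n = len(s)
--     odds = []
--     evens = []
--     oddIndex = []
--     evenIndex = []
--
--     for i in range(n):
--         if int(s[i]) % 2 == 0:
--             evens.append(s[i])
--             evenIndex.append(i)
--         else:
--             odds.append(s[i])
--             oddIndex.append(i)
--
--     evens.sort(reverse = 1)
--     odds.sort(reverse = 1)
--     res = [None] * n
--
--     for index, e in zip(evenIndex + oddIndex, evens + odds):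
--         res[index] = e
--
--     return int("".join(res))
-- ===== SOURCE B (Python) =====
-- def largestInteger(num: int) -> int:
--     s = str(num)
--     cnt = [0] * 10
--     for c in s:
--         cnt[ord(c) - 48] += 1
--     out = []
--     for c in s:
--         d = 9 if (ord(c) - 48) % 2 else 8
--         while cnt[d] == 0:
--             d -= 2
--         cnt[d] -= 1
--         out.append(chr(d + 48))
--     return int(''.join(out))
-- ===== Notes on version B (the rewrite author's own statement) =====
-- stated objective: alternative
-- what changed: B replaces A's comparison sorting of parity buckets plus index-list zip-scatter by a counting scheme: one pass builds a digit frequency table, then a second pass over the original digits greedily takes, for each position's parity, the largest digit whose counter is still non-zero (scanning 8,6,4,... or 9,7,5,...) and decrements it.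
import Mathlib
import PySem

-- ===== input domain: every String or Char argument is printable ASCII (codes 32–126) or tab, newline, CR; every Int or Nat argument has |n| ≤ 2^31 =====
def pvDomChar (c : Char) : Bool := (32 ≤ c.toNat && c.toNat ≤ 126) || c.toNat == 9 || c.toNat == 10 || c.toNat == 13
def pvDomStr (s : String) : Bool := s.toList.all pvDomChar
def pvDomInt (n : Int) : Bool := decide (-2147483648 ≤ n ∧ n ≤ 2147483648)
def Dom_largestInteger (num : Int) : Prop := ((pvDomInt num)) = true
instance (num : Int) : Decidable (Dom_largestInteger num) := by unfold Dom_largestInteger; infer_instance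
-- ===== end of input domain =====

-- B replaces A's comparison sorts of the parity buckets and the index-list zip-scatter by a
-- digit frequency table: one counting pass, then a pass over the original digits that greedily
-- takes the largest still-available digit of the matching parity (objective: alternative).

-- ===== PORT A =====
-- loop body: classify s[i] by int(s[i]) % 2 == 0, appending the digit and its index to the four lists
def pvStepA (st : List Char × List Char × List Int × List Int) (ic : Int × Char) :
    List Char × List Char × List Int × List Int :=
  let (odds, evens, oddIndex, evenIndex) := st
  if PySem.Int.mod ((PySem.Int.ofChars? [ic.2]).getD 0) 2 == 0 then
    (odds, evens ++ [ic.2], oddIndex, evenIndex ++ [ic.1])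
  else
    (odds ++ [ic.2], evens, oddIndex ++ [ic.1], evenIndex)

def largestInteger (num : Int) : Int :=
  let s := PySem.Int.toChars num                 -- list(str(num))
  let n := s.length
  let st := (PySem.List.enumerate s 0).foldl pvStepA ([], [], [], [])  -- for i in range(n): … s[i] …
  let odds := PySem.List.sorted st.1 (fun c => c) true                 -- odds.sort(reverse=1)
  let evens := PySem.List.sorted st.2.1 (fun c => c) true              -- evens.sort(reverse=1)
  let res : List (Option Char) := List.replicate n none                -- res = [None] * n
  let res := ((st.2.2.2 ++ st.2.2.1).zip (evens ++ odds)).foldl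
      (fun r p => PySem.List.pySetD r p.1 (some p.2)) res              -- res[index] = e (index always in range)
  -- "".join(res): every cell is filled, so getD ' ' is never used; int(..) parses under Pre_ (num ≥ 0)
  (PySem.Int.ofChars? (res.map (fun o => o.getD ' '))).getD 0

-- ===== PORT B =====
-- while cnt[d] == 0: d -= 2   (inside Pre_ a non-zero slot is always hit before d underflows,
-- so the structural guard at 0/1 only makes the recursion total)
def pvPick (cnt : List Int) : Nat → Nat
  | 0 => 0
  | 1 => 1
  | d + 2 => if PySem.List.pyGetD cnt ((d + 2 : Nat) : Int) 0 == 0 then pvPick cnt d else d + 2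

-- second pass: for c in s: pick largest remaining digit of c's parity, decrement, append its char
def pvBuild : List Char → List Int → List Char → List Char
  | [], _, out => out
  | c :: t, cnt, out =>
    let d := pvPick cnt (if PySem.Int.mod ((c.toNat : Int) - 48) 2 != 0 then 9 else 8)
    pvBuild t (PySem.List.pySetD cnt (d : Int) (PySem.List.pyGetD cnt (d : Int) 0 - 1))
      (out ++ [Char.ofNat (d + 48)])

def largestInteger_alt (num : Int) : Int :=
  let s := PySem.Int.toChars num                 -- str(num)
  let cnt := s.foldl (fun cnt c =>
      PySem.List.pySetD cnt ((c.toNat : Int) - 48)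
        (PySem.List.pyGetD cnt ((c.toNat : Int) - 48) 0 + 1)) (List.replicate 10 (0 : Int))
  (PySem.Int.ofChars? (pvBuild s cnt [])).getD 0

-- ===== PRECONDITION & SPEC =====
-- A raises ValueError for negative inputs: str(num) then contains the sign character, on which int() fails inside the classification loop.
def Pre_largestInteger (num : Int) : Prop := 0 ≤ num
instance (num : Int) : Decidable (Pre_largestInteger num) := by unfold Pre_largestInteger; infer_instance
def pvWitness_largestInteger : Int := 2024

def Spec_largestInteger (num : Int) (out : Int) : Prop := out = largestInteger_alt num
instance (num : Int) (out : Int) : Decidable (Spec_largestInteger num out) := by unfold Spec_largestInteger; infer_instance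

-- ===== CLAIM =====
def Claim_equal_largestInteger : Prop :=
  ∀ (num : Int), Dom_largestInteger num → Pre_largestInteger num →
    Spec_largestInteger num (largestInteger num)

-- ===== LEMMAS AND PROOFS =====

-- A's parity test, as a predicate on one character
def pvAEven (c : Char) : Bool := PySem.Int.mod ((PySem.Int.ofChars? [c]).getD 0) 2 == 0

-- positions (base 0) of the characters satisfying p
def pvIdx (p : Char → Bool) : List Char → List Int
  | [] => []
  | c :: t => if p c then 0 :: (pvIdx p t).map (· + 1) else (pvIdx p t).map (· + 1)

-- A's scatter, rephrased as a forward walk consuming the fronts of the two buckets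
def pvWalkP (p : Char → Bool) : List Char → List Char → List Char → List Char
  | [], _, _ => []
  | c :: t, E, O =>
    if p c then E.headD ' ' :: pvWalkP p t E.tail O
    else O.headD ' ' :: pvWalkP p t E O.tail

def pvSet (r : List (Option Char)) (p : Int × Char) : List (Option Char) :=
  PySem.List.pySetD r p.1 (some p.2)

def pvDigits : List Char := ['0', '1', '2', '3', '4', '5', '6', '7', '8', '9']

lemma pvIdx_nonneg (p : Char → Bool) : ∀ s, ∀ i ∈ pvIdx p s, 0 ≤ i := by
  intro s
  induction s with
  | nil => simp [pvIdx]
  | cons c t ih =>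
    intro i hi
    simp only [pvIdx] at hi
    split at hi
    · rcases List.mem_cons.1 hi with h | h
      · omega
      · obtain ⟨j, hj, rfl⟩ := List.mem_map.1 h
        have := ih j hj; omega
    · obtain ⟨j, hj, rfl⟩ := List.mem_map.1 hi
      have := ih j hj; omega

lemma pvIdx_length (p : Char → Bool) : ∀ s, (pvIdx p s).length = (s.filter p).length := by
  intro s
  induction s with
  | nil => rfl
  | cons c t ih =>
    simp only [pvIdx, List.filter_cons]
    split <;> simp [ih]

-- A's classification loop computes the two filters and the two (shifted) index lists
lemma pvLoopA : ∀ (s : List Char) (k : Int) (a b : List Char) (ci di : List Int),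
    (PySem.List.enumerate s k).foldl pvStepA (a, b, ci, di) =
      (a ++ s.filter (fun c => !pvAEven c), b ++ s.filter pvAEven,
       ci ++ (pvIdx (fun c => !pvAEven c) s).map (· + k), di ++ (pvIdx pvAEven s).map (· + k)) := by
  intro s
  induction s with
  | nil => simp [PySem.List.enumerate_nil, pvIdx]
  | cons c t ih =>
    intro k a b ci di
    rw [PySem.List.enumerate_cons, List.foldl_cons]
    by_cases hc : pvAEven c
    · have : pvStepA (a, b, ci, di) (k, c) = (a, b ++ [c], ci, di ++ [k]) := by
        simp only [pvStepA, pvAEven] at hc ⊢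
        rw [if_pos hc]
      rw [this, ih]
      simp only [pvIdx, hc, Bool.not_true, if_pos, List.filter_cons]
      simp [List.map_map, List.append_assoc]
      exact ⟨fun x _ => by omega, fun x _ => by omega⟩
    · have : pvStepA (a, b, ci, di) (k, c) = (a ++ [c], b, ci ++ [k], di) := by
        simp only [pvStepA, pvAEven] at hc ⊢
        rw [if_neg hc]
      rw [this, ih]
      simp only [pvIdx, hc, List.filter_cons]
      simp [List.map_map, List.append_assoc]
      exact ⟨fun x _ => by omega, fun x _ => by omega⟩

-- sets at shifted indices leave the head alone
lemma pvShift : ∀ (pairs : List (Int × Char)) (x : Option Char) (r : List (Option Char)),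
    (∀ p ∈ pairs, 0 ≤ p.1) →
    (pairs.map (Prod.map (· + 1) id)).foldl pvSet (x :: r) = x :: pairs.foldl pvSet r := by
  intro pairs
  induction pairs with
  | nil => simp
  | cons q t ih =>
    intro x r h
    obtain ⟨i, v⟩ := q
    have hi : 0 ≤ i := h (i, v) (List.mem_cons_self)
    have hstep : pvSet (x :: r) (i + 1, v) = x :: pvSet r (i, v) := by
      simp only [pvSet]
      rw [PySem.List.pySetD_of_nonneg (x :: r) (some v) (show (0:Int) ≤ i + 1 by omega),
        PySem.List.pySetD_of_nonneg r (some v) hi]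
      have h1 : (i + 1).toNat = i.toNat + 1 := by omega
      rw [h1]
      rfl
    simp only [List.map_cons, List.foldl_cons, Prod.map, id]
    rw [hstep, ih _ _ (fun p hp => h p (List.mem_cons_of_mem _ hp))]

lemma pvZipNonneg (p : Char → Bool) (t : List Char) (L : List Char) :
    ∀ q ∈ (pvIdx p t).zip L, 0 ≤ (q : Int × Char).1 := by
  intro q hq
  obtain ⟨i, v⟩ := q
  exact pvIdx_nonneg p t i (List.of_mem_zip hq).1

-- the zip-scatter over the two buckets equals the forward walk
lemma pvScatter (p : Char → Bool) : ∀ (s : List Char) (E O : List Char),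
    E.length = (s.filter p).length → O.length = (s.filter (fun c => !p c)).length →
    ((pvIdx p s ++ pvIdx (fun c => !p c) s).zip (E ++ O)).foldl pvSet
        (List.replicate s.length none) = (pvWalkP p s E O).map some := by
  intro s
  induction s with
  | nil =>
    intro E O hE hO
    simp only [List.filter_nil, List.length_nil] at hE hO
    rw [List.eq_nil_of_length_eq_zero hE, List.eq_nil_of_length_eq_zero hO]
    simp [pvIdx, pvWalkP]
  | cons c t ih =>
    intro E O hE hO
    by_cases hc : p c
    · rw [List.filter_cons, if_pos hc] at hE
      obtain ⟨e, E', rfl⟩ : ∃ e E', E = e :: E' := by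
        cases E with
        | nil => simp at hE
        | cons e E' => exact ⟨e, E', rfl⟩
      simp only [List.length_cons, Nat.succ.injEq] at hE
      rw [List.filter_cons, if_neg (by simp [hc])] at hO
      simp only [pvIdx, if_pos hc, if_neg (show ¬(!p c) = true by simp [hc])]
      have hzip : ((0 :: (pvIdx p t).map (· + 1) ++ (pvIdx (fun c => !p c) t).map (· + 1)).zip
            ((e :: E') ++ O))
          = (0, e) :: (((pvIdx p t ++ pvIdx (fun c => !p c) t).zip (E' ++ O)).map
              (Prod.map (· + 1) id)) := by
        simp [← List.map_append, List.zip_map_left]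
      rw [List.length_cons, List.replicate_succ, hzip, List.foldl_cons]
      have h0 : pvSet (none :: List.replicate t.length none) (0, e)
          = some e :: List.replicate t.length none := by
        simp [pvSet, PySem.List.pySetD_of_nonneg _ (some e) (le_refl (0:Int))]
      rw [h0, pvShift _ _ _ (by
        intro q hq
        obtain ⟨i, v⟩ := q
        rcases List.mem_append.1 (List.of_mem_zip hq).1 with h | h
        · exact pvIdx_nonneg p t i h
        · exact pvIdx_nonneg _ t i h)]
      rw [ih E' O hE hO]
      simp [pvWalkP, hc]
    · rw [List.filter_cons, if_neg hc] at hE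
      rw [List.filter_cons, if_pos (by simp [hc])] at hO
      obtain ⟨o, O', rfl⟩ : ∃ o O', O = o :: O' := by
        cases O with
        | nil => simp at hO
        | cons o O' => exact ⟨o, O', rfl⟩
      simp only [List.length_cons, Nat.succ.injEq] at hO
      simp only [pvIdx, if_neg hc, if_pos (show (!p c) = true by simp [hc])]
      have hlen : ((pvIdx p t).map (· + 1)).length = E.length := by
        rw [List.length_map, pvIdx_length, hE]
      rw [List.zip_append hlen, List.length_cons, List.replicate_succ, List.foldl_append,
        List.zip_map_left, pvShift _ _ _ (pvZipNonneg p t E)]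
      rw [List.zip_cons_cons, List.foldl_cons]
      have h0 : pvSet (none :: List.foldl pvSet (List.replicate t.length none) ((pvIdx p t).zip E)) (0, o)
          = some o :: List.foldl pvSet (List.replicate t.length none) ((pvIdx p t).zip E) := by
        simp [pvSet, PySem.List.pySetD_of_nonneg _ (some o) (le_refl (0:Int))]
      rw [h0, List.zip_map_left, pvShift _ _ _ (pvZipNonneg _ t O'), ← List.foldl_append,
        ← List.zip_append (by rw [pvIdx_length, hE]), ih E O' hE hO]
      simp [pvWalkP, hc]

lemma pvMemToDigitsCore : ∀ (fuel n : Nat) (ds : List Char) (c : Char),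
    c ∈ Nat.toDigitsCore 10 fuel n ds → c ∈ ds ∨ c ∈ pvDigits := by
  have hdc : ∀ m, m < 10 → Nat.digitChar m ∈ pvDigits := by decide
  intro fuel
  induction fuel with
  | zero => intro n ds c h; exact Or.inl h
  | succ f ih =>
    intro n ds c h
    simp only [Nat.toDigitsCore] at h
    split at h
    · rcases List.mem_cons.1 h with rfl | h
      · exact Or.inr (hdc _ (Nat.mod_lt _ (by norm_num)))
      · exact Or.inl h
    · rcases ih _ _ _ h with h | h
      · rcases List.mem_cons.1 h with rfl | h
        · exact Or.inr (hdc _ (Nat.mod_lt _ (by norm_num)))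
        · exact Or.inl h
      · exact Or.inr h

lemma pvToCharsDigits (num : Int) (h : 0 ≤ num) : ∀ c ∈ PySem.Int.toChars num, c ∈ pvDigits := by
  intro c hc
  simp only [PySem.Int.toChars, if_neg (by omega : ¬num < 0)] at hc
  rcases pvMemToDigitsCore _ _ _ _ hc with h' | h'
  · simp at h'
  · exact h'

-- digit characters have codes 48+d with d < 10, and round-trip through Char.ofNat
lemma pvDigitCode (c : Char) (h : c ∈ pvDigits) :
    48 ≤ c.toNat ∧ c.toNat < 58 ∧ Char.ofNat c.toNat = c := by
  fin_cases h <;> refine ⟨by decide, by decide, by decide⟩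

lemma pvOfNatToNat (d : Nat) (h : d < 10) : (Char.ofNat (d + 48)).toNat = d + 48 := by
  interval_cases d <;> decide

-- B's parity test on one digit char agrees with A's
lemma pvParityStart (c : Char) (h : c ∈ pvDigits) :
    (PySem.Int.mod ((c.toNat : Int) - 48) 2 != 0) = !pvAEven c := by
  fin_cases h <;> decide

lemma pvEvenVal (c : Char) (h : c ∈ pvDigits) (hA : pvAEven c = true) :
    (c.toNat - 48) % 2 = 0 := by
  fin_cases h <;> revert hA <;> decide

lemma pvOddVal (c : Char) (h : c ∈ pvDigits) (hA : pvAEven c = false) :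
    (c.toNat - 48) % 2 = 1 := by
  fin_cases h <;> revert hA <;> decide

lemma pvAEvenOfNat (d : Nat) (h : d < 10) :
    pvAEven (Char.ofNat (d + 48)) = (d % 2 == 0) := by
  interval_cases d <;> decide

-- the while-loop scan from 8 (resp. 9) stops at the largest slot of that parity still non-zero
lemma pvPickEven (cnt : List Int) (h : Nat) (hlt : h < 10) (hev : h % 2 = 0)
    (hz : ∀ d : Nat, d < 10 → d % 2 = 0 → h < d → PySem.List.pyGetD cnt (d : Int) 0 = 0)
    (hnz : PySem.List.pyGetD cnt (h : Int) 0 ≠ 0) :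
    pvPick cnt 8 = h := by
  interval_cases h
  all_goals try (exfalso; revert hev; omega)
  ·
    have z8 := hz 8 (by norm_num) (by norm_num) (by norm_num)
    have z6 := hz 6 (by norm_num) (by norm_num) (by norm_num)
    have z4 := hz 4 (by norm_num) (by norm_num) (by norm_num)
    have z2 := hz 2 (by norm_num) (by norm_num) (by norm_num)
    push_cast at z8 z6 z4 z2 hnz
    simp only [pvPick]
    norm_num [z8, z6, z4, z2, hnz]
  ·
    have z8 := hz 8 (by norm_num) (by norm_num) (by norm_num)
    have z6 := hz 6 (by norm_num) (by norm_num) (by norm_num)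
    have z4 := hz 4 (by norm_num) (by norm_num) (by norm_num)
    push_cast at z8 z6 z4 hnz
    simp only [pvPick]
    norm_num [z8, z6, z4, hnz]
  ·
    have z8 := hz 8 (by norm_num) (by norm_num) (by norm_num)
    have z6 := hz 6 (by norm_num) (by norm_num) (by norm_num)
    push_cast at z8 z6 hnz
    simp only [pvPick]
    norm_num [z8, z6, hnz]
  ·
    have z8 := hz 8 (by norm_num) (by norm_num) (by norm_num)
    push_cast at z8 hnz
    simp only [pvPick]
    norm_num [z8, hnz]
  · push_cast at hnz
    simp only [pvPick]
    norm_num [hnz]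

lemma pvPickOdd (cnt : List Int) (h : Nat) (hlt : h < 10) (hev : h % 2 = 1)
    (hz : ∀ d : Nat, d < 10 → d % 2 = 1 → h < d → PySem.List.pyGetD cnt (d : Int) 0 = 0)
    (hnz : PySem.List.pyGetD cnt (h : Int) 0 ≠ 0) :
    pvPick cnt 9 = h := by
  interval_cases h
  all_goals try (exfalso; revert hev; omega)
  ·
    have z9 := hz 9 (by norm_num) (by norm_num) (by norm_num)
    have z7 := hz 7 (by norm_num) (by norm_num) (by norm_num)
    have z5 := hz 5 (by norm_num) (by norm_num) (by norm_num)
    have z3 := hz 3 (by norm_num) (by norm_num) (by norm_num)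
    push_cast at z9 z7 z5 z3 hnz
    simp only [pvPick]
    norm_num [z9, z7, z5, z3, hnz]
  ·
    have z9 := hz 9 (by norm_num) (by norm_num) (by norm_num)
    have z7 := hz 7 (by norm_num) (by norm_num) (by norm_num)
    have z5 := hz 5 (by norm_num) (by norm_num) (by norm_num)
    push_cast at z9 z7 z5 hnz
    simp only [pvPick]
    norm_num [z9, z7, z5, hnz]
  ·
    have z9 := hz 9 (by norm_num) (by norm_num) (by norm_num)
    have z7 := hz 7 (by norm_num) (by norm_num) (by norm_num)
    push_cast at z9 z7 hnz
    simp only [pvPick]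
    norm_num [z9, z7, hnz]
  ·
    have z9 := hz 9 (by norm_num) (by norm_num) (by norm_num)
    push_cast at z9 hnz
    simp only [pvPick]
    norm_num [z9, hnz]
  · push_cast at hnz
    simp only [pvPick]
    norm_num [hnz]

lemma pvCharLe (a b : Char) (h : a ≤ b) : a.toNat ≤ b.toNat := Fin.mk_le_mk.mp h

-- B's second pass equals the forward walk over the sorted buckets
lemma pvBuildWalk : ∀ (s E O : List Char) (cnt : List Int) (out : List Char),
    (∀ c ∈ s, c ∈ pvDigits) →
    (∀ c ∈ E, c ∈ pvDigits ∧ pvAEven c = true) →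
    (∀ c ∈ O, c ∈ pvDigits ∧ pvAEven c = false) →
    E.Pairwise (fun a b => b ≤ a) → O.Pairwise (fun a b => b ≤ a) →
    E.length = (s.filter pvAEven).length →
    O.length = (s.filter (fun c => !pvAEven c)).length →
    cnt.length = 10 →
    (∀ d : Nat, d < 10 →
      PySem.List.pyGetD cnt (d : Int) 0 = ((E ++ O).count (Char.ofNat (d + 48)) : Int)) →
    pvBuild s cnt out = out ++ pvWalkP pvAEven s E O := by
  intro s
  induction s with
  | nil =>
    intro E O cnt out _ _ _ _ _ _ _ _ _
    simp [pvBuild, pvWalkP]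
  | cons c t ih =>
    intro E O cnt out hs hE hO pE pO lE lO hcl hcnt
    have hc := hs c List.mem_cons_self
    by_cases he : pvAEven c = true
    · -- even position: consume the head of E
      rw [List.filter_cons, if_pos he] at lE
      rw [List.filter_cons, if_neg (by simp [he])] at lO
      obtain ⟨e, E', rfl⟩ : ∃ e E', E = e :: E' := by
        cases E with
        | nil => simp at lE
        | cons e E' => exact ⟨e, E', rfl⟩
      simp only [List.length_cons, Nat.succ.injEq] at lE
      obtain ⟨hedig, heev⟩ := hE e List.mem_cons_self
      obtain ⟨h48, h58, hofe⟩ := pvDigitCode e hedig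
      have hv10 : e.toNat - 48 < 10 := by omega
      have hche : Char.ofNat (e.toNat - 48 + 48) = e := by
        rw [show e.toNat - 48 + 48 = e.toNat by omega, hofe]
      have hpick : pvPick cnt 8 = e.toNat - 48 := by
        apply pvPickEven cnt (e.toNat - 48) hv10 (pvEvenVal e hedig heev)
        · intro d hd hdev hlt
          rw [hcnt d hd]
          have : Char.ofNat (d + 48) ∉ (e :: E') ++ O := by
            intro hmem
            rcases List.mem_append.1 hmem with hm | hm
            · have hle : Char.ofNat (d + 48) ≤ e := by
                rcases List.mem_cons.1 hm with hEq | hm'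
                · exact le_of_eq hEq
                · exact (List.pairwise_cons.1 pE).1 _ hm'
              have := pvCharLe _ _ hle
              rw [pvOfNatToNat d hd] at this
              omega
            · have hodd := (hO _ hm).2
              rw [pvAEvenOfNat d hd] at hodd
              simp [hdev] at hodd
          rw [List.count_eq_zero.2 this]
          rfl
        · rw [hcnt _ hv10, hche]
          have : 0 < ((e :: E') ++ O).count e :=
            List.count_pos_iff.mpr (by simp)
          intro hzero
          omega
      -- one step of pvBuild
      have hstart : (PySem.Int.mod ((c.toNat : Int) - 48) 2 != 0) = false := by
        rw [pvParityStart c hc, he]; rfl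
      simp only [pvBuild, hstart, Bool.false_eq_true, ite_false, hpick]
      -- the updated counter describes E' ++ O
      rw [ih E' O _ _
        (fun x hx => hs x (List.mem_cons_of_mem _ hx))
        (fun x hx => hE x (List.mem_cons_of_mem _ hx)) hO
        (List.pairwise_cons.1 pE).2 pO lE lO
        (by rw [PySem.List.length_pySetD]; exact hcl) ?_]
      · rw [hche]
        simp [pvWalkP, he]
      · intro d hd
        have hset := PySem.List.pyGetD_pySetD_natCast cnt (e.toNat - 48) d
          (PySem.List.pyGetD cnt ((e.toNat - 48 : Nat) : Int) 0 - 1) 0 (by omega)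
        rw [hset]
        by_cases hdk : d = e.toNat - 48
        · subst hdk
          rw [if_pos rfl, hcnt _ hv10, hche]
          rw [show (e :: E') ++ O = e :: (E' ++ O) from rfl, List.count_cons_self]
          push_cast; ring
        · have hne : e ≠ Char.ofNat (d + 48) := by
            intro hEq
            have := congrArg Char.toNat hEq
            rw [pvOfNatToNat d hd] at this
            omega
          rw [if_neg hdk, hcnt d hd,
            show (e :: E') ++ O = e :: (E' ++ O) from rfl,
            List.count_cons_of_ne hne]
    · -- odd position: consume the head of O
      have he' : pvAEven c = false := by simpa using he
      rw [List.filter_cons, if_neg (by simp [he'])] at lE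
      rw [List.filter_cons, if_pos (by simp [he'])] at lO
      obtain ⟨o, O', rfl⟩ : ∃ o O', O = o :: O' := by
        cases O with
        | nil => simp at lO
        | cons o O' => exact ⟨o, O', rfl⟩
      simp only [List.length_cons, Nat.succ.injEq] at lO
      obtain ⟨hodig, hoev⟩ := hO o List.mem_cons_self
      obtain ⟨h48, h58, hofo⟩ := pvDigitCode o hodig
      have hv10 : o.toNat - 48 < 10 := by omega
      have hcho : Char.ofNat (o.toNat - 48 + 48) = o := by
        rw [show o.toNat - 48 + 48 = o.toNat by omega, hofo]
      have hpick : pvPick cnt 9 = o.toNat - 48 := by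
        apply pvPickOdd cnt (o.toNat - 48) hv10 (pvOddVal o hodig hoev)
        · intro d hd hdev hlt
          rw [hcnt d hd]
          have : Char.ofNat (d + 48) ∉ E ++ (o :: O') := by
            intro hmem
            rcases List.mem_append.1 hmem with hm | hm
            · have hev := (hE _ hm).2
              rw [pvAEvenOfNat d hd] at hev
              simp [hdev] at hev
            · have hle : Char.ofNat (d + 48) ≤ o := by
                rcases List.mem_cons.1 hm with hEq | hm'
                · exact le_of_eq hEq
                · exact (List.pairwise_cons.1 pO).1 _ hm'
              have := pvCharLe _ _ hle
              rw [pvOfNatToNat d hd] at this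
              omega
          rw [List.count_eq_zero.2 this]
          rfl
        · rw [hcnt _ hv10, hcho]
          have : 0 < (E ++ (o :: O')).count o :=
            List.count_pos_iff.mpr (by simp)
          intro hzero
          omega
      have hstart : (PySem.Int.mod ((c.toNat : Int) - 48) 2 != 0) = true := by
        rw [pvParityStart c hc, he']; rfl
      simp only [pvBuild, hstart, ite_true, hpick]
      rw [ih E O' _ _
        (fun x hx => hs x (List.mem_cons_of_mem _ hx))
        hE (fun x hx => hO x (List.mem_cons_of_mem _ hx))
        pE (List.pairwise_cons.1 pO).2 lE lO
        (by rw [PySem.List.length_pySetD]; exact hcl) ?_]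
      · rw [hcho]
        simp [pvWalkP, he']
      · intro d hd
        have hset := PySem.List.pyGetD_pySetD_natCast cnt (o.toNat - 48) d
          (PySem.List.pyGetD cnt ((o.toNat - 48 : Nat) : Int) 0 - 1) 0 (by omega)
        rw [hset]
        by_cases hdk : d = o.toNat - 48
        · subst hdk
          rw [if_pos rfl, hcnt _ hv10, hcho]
          have hcount : (E ++ (o :: O')).count o = (E ++ O').count o + 1 := by
            rw [List.count_append, List.count_append, List.count_cons_self]
            ring
          rw [hcount]
          push_cast; ring
        · have hne : o ≠ Char.ofNat (d + 48) := by
            intro hEq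
            have := congrArg Char.toNat hEq
            rw [pvOfNatToNat d hd] at this
            omega
          rw [if_neg hdk, hcnt d hd, List.count_append, List.count_append,
            List.count_cons_of_ne hne]

-- the counting pass: slot d of the fold holds (initial value) + (count of the digit char d in s)
lemma pvCntFold : ∀ (s : List Char) (cnt : List Int), cnt.length = 10 →
    (∀ c ∈ s, c ∈ pvDigits) →
    (s.foldl (fun cnt c =>
        PySem.List.pySetD cnt ((c.toNat : Int) - 48)
          (PySem.List.pyGetD cnt ((c.toNat : Int) - 48) 0 + 1)) cnt).length = 10 ∧
    ∀ d : Nat, d < 10 →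
      PySem.List.pyGetD (s.foldl (fun cnt c =>
        PySem.List.pySetD cnt ((c.toNat : Int) - 48)
          (PySem.List.pyGetD cnt ((c.toNat : Int) - 48) 0 + 1)) cnt) (d : Int) 0
      = PySem.List.pyGetD cnt (d : Int) 0 + (s.count (Char.ofNat (d + 48)) : Int) := by
  intro s
  induction s with
  | nil => intro cnt hl _; exact ⟨hl, by simp⟩
  | cons c t ih =>
    intro cnt hl hdig
    have hc := hdig c List.mem_cons_self
    obtain ⟨h48, h58, hofn⟩ := pvDigitCode c hc
    have hidx : (c.toNat : Int) - 48 = ((c.toNat - 48 : Nat) : Int) := by omega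
    simp only [List.foldl_cons, hidx]
    obtain ⟨L, V⟩ := ih (PySem.List.pySetD cnt ((c.toNat - 48 : Nat) : Int)
        (PySem.List.pyGetD cnt ((c.toNat - 48 : Nat) : Int) 0 + 1))
      (by rw [PySem.List.length_pySetD]; exact hl)
      (fun x hx => hdig x (List.mem_cons_of_mem _ hx))
    refine ⟨L, fun d hd => ?_⟩
    rw [V d hd, PySem.List.pyGetD_pySetD_natCast cnt (c.toNat - 48) d _ 0 (by omega)]
    by_cases hdk : d = c.toNat - 48
    · have hch : Char.ofNat (d + 48) = c := by
        rw [show d + 48 = c.toNat by omega, hofn]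
      rw [if_pos hdk, hch, List.count_cons_self, hdk]
      push_cast; ring
    · have hch : c ≠ Char.ofNat (d + 48) := by
        intro hEq
        have := congrArg Char.toNat hEq
        rw [pvOfNatToNat d hd] at this
        omega
      rw [if_neg hdk, List.count_cons_of_ne hch]

-- ===== VERDICT =====
theorem largestInteger_spec : Claim_equal_largestInteger := by
  intro num _ hpre
  unfold Spec_largestInteger
  simp only [largestInteger, largestInteger_alt]
  have hd := pvToCharsDigits num hpre
  have hstep : (fun r (p : Int × Char) => PySem.List.pySetD r p.1 (some p.2)) = pvSet := by
    funext r p; rfl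
  rw [hstep, pvLoopA]
  simp only [List.nil_append]
  have hmap0 : ∀ l : List Int, l.map (· + (0:Int)) = l := by intro l; simp
  rw [hmap0, hmap0]
  rw [pvScatter pvAEven _ _ _ (by rw [PySem.List.length_sorted]) (by rw [PySem.List.length_sorted])]
  obtain ⟨L, V⟩ := pvCntFold (PySem.Int.toChars num) (List.replicate 10 0) (by simp) hd
  rw [pvBuildWalk (PySem.Int.toChars num)
      (PySem.List.sorted ((PySem.Int.toChars num).filter pvAEven) (fun c => c) true)
      (PySem.List.sorted ((PySem.Int.toChars num).filter (fun c => !pvAEven c)) (fun c => c) true)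
      _ [] hd
      (fun x hx => by
        have hm := List.mem_filter.1 ((PySem.List.mem_sorted _ _ _ x).1 hx)
        exact ⟨hd x hm.1, hm.2⟩)
      (fun x hx => by
        have hm := List.mem_filter.1 ((PySem.List.mem_sorted _ _ _ x).1 hx)
        exact ⟨hd x hm.1, by simpa using hm.2⟩)
      (by exact (PySem.List.sorted_pairwise_rev ((PySem.Int.toChars num).filter pvAEven) (fun c => c) : _))
      (by exact (PySem.List.sorted_pairwise_rev ((PySem.Int.toChars num).filter (fun c => !pvAEven c)) (fun c => c) : _))
      (by rw [PySem.List.length_sorted])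
      (by rw [PySem.List.length_sorted])
      L ?_]
  · simp [List.map_map]
  · intro d hdlt
    rw [V d hdlt, List.count_append,
      (PySem.List.sorted_perm _ _ _).count_eq, (PySem.List.sorted_perm _ _ _).count_eq]
    have hrep : PySem.List.pyGetD (List.replicate 10 (0:Int)) ((d : Nat) : Int) 0 = 0 := by
      rw [PySem.List.pyGetD_natCast]
      interval_cases d <;> rfl
    rw [hrep, zero_add]
    by_cases hA : pvAEven (Char.ofNat (d + 48)) = true
    · rw [List.count_filter (p := pvAEven) hA]
      have hno : Char.ofNat (d + 48) ∉
          (PySem.Int.toChars num).filter (fun c => !pvAEven c) := by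
        intro hm
        have := (List.mem_filter.1 hm).2
        simp [hA] at this
      rw [List.count_eq_zero.2 hno]
      push_cast; ring
    · have hA' : (!pvAEven (Char.ofNat (d + 48))) = true := by simp [hA]
      rw [List.count_filter (p := fun c => !pvAEven c) hA']
      have hno : Char.ofNat (d + 48) ∉ (PySem.Int.toChars num).filter pvAEven := by
        intro hm
        have := (List.mem_filter.1 hm).2
        exact hA this
      rw [List.count_eq_zero.2 hno]
      push_cast; ring
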